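-- pv_equiv track=rewrite | github.com/najeca/umaplay | core/utils/event_processor.py | select_candidate_by_priority
-- ===== SOURCE A (Python) =====
-- from typing import Any, Dict, List, Optional, Sequence, Tuple, Set
--
-- DEFAULT_REWARD_PRIORITY: List[str] = ["skill_pts", "stats", "hints"]
--
-- _VALID_REWARD_CATEGORIES: Set[str] = {"skill_pts", "hints", "stats", "energy"}
--
-- def select_candidate_by_priority(
--     candidate_order: List[int],
--     safe_candidates: List[int],
--     option_categories: Dict[int, Set[str]],
--     priority: List[str],
-- ) -> Optional[Tuple[int, Optional[str]]]:
--     if not safe_candidates: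
--         return None
--     priority = [p for p in priority if p in _VALID_REWARD_CATEGORIES] or list(
--         DEFAULT_REWARD_PRIORITY
--     )
--
--     safe_seen = set(safe_candidates)
--     for category in priority:
--         for opt in candidate_order:
--             if opt not in safe_seen:
--                 continue
--             if category in option_categories.get(opt, set()):
--                 return opt, category
--
--     for opt in candidate_order:
--         if opt in safe_seen:
--             return opt, None
--     return None
-- ===== SOURCE B (Python) =====
-- from typing import Dict, List, Optional, Set, Tuple
--
-- DEFAULT_REWARD_PRIORITY: List[str] = ["skill_pts", "stats", "hints"]
-- _VALID_REWARD_CATEGORIES: Set[str] = {"skill_pts", "hints", "stats", "energy"}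
--
-- def select_candidate_by_priority(
--     candidate_order: List[int],
--     safe_candidates: List[int],
--     option_categories: Dict[int, Set[str]],
--     priority: List[str],
-- ) -> Optional[Tuple[int, Optional[str]]]:
--     pri = [p for p in priority if p in _VALID_REWARD_CATEGORIES]
--     if not pri:
--         pri = list(DEFAULT_REWARD_PRIORITY)
--     safe_seen = set(safe_candidates)
--     best = None  # (rank, opt, category) with minimal rank, first candidate wins
--     first_safe = None
--     for opt in candidate_order:
--         if opt in safe_seen:
--             if first_safe is None:
--                 first_safe = opt
--             cats = option_categories.get(opt, set())
--             hit = next(((i, c) for i, c in enumerate(pri) if c in cats), None)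
--             if hit is not None and (best is None or hit[0] < best[0]):
--                 best = (hit[0], opt, hit[1])
--     if best is not None:
--         return best[1], best[2]
--     if first_safe is not None:
--         return first_safe, None
--     return None
-- ===== Notes on version B (the rewrite author's own statement) =====
-- stated objective: alternative
-- what changed: Replaces A's priority-major nested scan (for each category, rescan all candidates) by a single pass over candidate_order that computes each safe candidate's minimal priority rank and keeps the minimum with first-wins tie-breaking, capturing the fallback candidate in the same pass.
import Mathlib
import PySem

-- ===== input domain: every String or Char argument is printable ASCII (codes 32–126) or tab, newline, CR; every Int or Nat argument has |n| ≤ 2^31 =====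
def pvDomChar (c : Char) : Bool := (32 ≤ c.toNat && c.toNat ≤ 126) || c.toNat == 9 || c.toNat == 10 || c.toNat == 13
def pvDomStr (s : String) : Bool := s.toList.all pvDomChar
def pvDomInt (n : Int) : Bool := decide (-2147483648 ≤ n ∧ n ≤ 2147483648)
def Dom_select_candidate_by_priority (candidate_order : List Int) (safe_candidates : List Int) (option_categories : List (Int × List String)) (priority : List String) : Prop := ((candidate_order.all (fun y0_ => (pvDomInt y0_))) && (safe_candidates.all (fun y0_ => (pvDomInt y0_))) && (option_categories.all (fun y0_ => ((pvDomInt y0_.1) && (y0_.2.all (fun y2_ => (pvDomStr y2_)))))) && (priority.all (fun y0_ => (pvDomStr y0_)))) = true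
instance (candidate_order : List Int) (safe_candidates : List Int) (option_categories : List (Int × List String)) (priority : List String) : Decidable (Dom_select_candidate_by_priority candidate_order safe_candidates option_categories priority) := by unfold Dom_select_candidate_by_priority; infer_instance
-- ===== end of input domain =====

-- ===== PORT A =====
-- B changes the decomposition only: one pass over candidate_order with a min-rank
-- accumulator instead of A's priority-major nested rescan; same results, similar cost.

-- A-side helper: the inner 'for opt in candidate_order' scan for one category
def pvFindOpt (seen : PySem.Set Int) (oc : List (Int × List String)) (cat : String) :
    List Int → Option Int
  | [] => none
  | o :: rest =>
    if seen.contains o then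
      if ((PySem.Dict.mk oc).getD o []).contains cat then some o
      else pvFindOpt seen oc cat rest
    else pvFindOpt seen oc cat rest

-- A-side helper: the outer 'for category in priority' loop
def pvLoopA (co : List Int) (seen : PySem.Set Int) (oc : List (Int × List String)) :
    List String → Option (Int × Option String)
  | [] => none
  | cat :: rest =>
    match pvFindOpt seen oc cat co with
    | some o => some (o, some cat)
    | none => pvLoopA co seen oc rest

-- A-side helper: the final fallback loop 'for opt in candidate_order: if opt in safe_seen'
def pvFallback (seen : PySem.Set Int) : List Int → Option (Int × Option String)
  | [] => none
  | o :: rest => if seen.contains o then some (o, none) else pvFallback seen rest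

def select_candidate_by_priority (candidate_order : List Int) (safe_candidates : List Int) (option_categories : List (Int × List String)) (priority : List String) : Option (Int × Option String) :=
  if safe_candidates = [] then none
  else
    let pr0 := priority.filter (fun p => (["skill_pts", "hints", "stats", "energy"] : List String).contains p)
    let pr := if pr0 = [] then ["skill_pts", "stats", "hints"] else pr0
    let seen := PySem.Set.ofList safe_candidates
    match pvLoopA candidate_order seen option_categories pr with
    | some r => some r
    | none => pvFallback seen candidate_order

-- ===== PORT B =====
-- B-side helper: hit = next(((i, c) for i, c in enumerate(priority) if c in cats), None)
def pvRankHit (cats : List String) : List String → Option (Nat × String)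
  | [] => none
  | p :: ps =>
    if cats.contains p then some (0, p)
    else (pvRankHit cats ps).map (fun ic => (ic.1 + 1, ic.2))

-- B-side helper: one iteration of B's single loop; state = (best, first_safe)
def pvStepB (seen : PySem.Set Int) (oc : List (Int × List String)) (pr : List String)
    (st : Option (Nat × Int × String) × Option Int) (o : Int) :
    Option (Nat × Int × String) × Option Int :=
  if seen.contains o then
    let fs := match st.2 with | none => some o | some x => some x
    let best :=
      match pvRankHit ((PySem.Dict.mk oc).getD o []) pr with
      | none => st.1
      | some (i, c) =>
        match st.1 with
        | none => some (i, o, c)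
        | some (j, o', c') => if i < j then some (i, o, c) else some (j, o', c')
    (best, fs)
  else st

def select_candidate_by_priority_alt (candidate_order : List Int) (safe_candidates : List Int) (option_categories : List (Int × List String)) (priority : List String) : Option (Int × Option String) :=
  let pri0 := priority.filter (fun p => (["skill_pts", "hints", "stats", "energy"] : List String).contains p)
  let pri := if pri0 = [] then ["skill_pts", "stats", "hints"] else pri0
  let st := candidate_order.foldl
    (pvStepB (PySem.Set.ofList safe_candidates) option_categories pri) (none, none)
  match st.1 with
  | some (_, o, c) => some (o, some c)
  | none =>
    match st.2 with
    | some o => some (o, none)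
    | none => none

-- ===== PRECONDITION & SPEC =====
def Spec_select_candidate_by_priority (candidate_order : List Int) (safe_candidates : List Int) (option_categories : List (Int × List String)) (priority : List String) (out : Option (Int × Option String)) : Prop := out = select_candidate_by_priority_alt candidate_order safe_candidates option_categories priority
instance (candidate_order : List Int) (safe_candidates : List Int) (option_categories : List (Int × List String)) (priority : List String) (out : Option (Int × Option String)) : Decidable (Spec_select_candidate_by_priority candidate_order safe_candidates option_categories priority out) := by unfold Spec_select_candidate_by_priority; infer_instance

-- ===== CLAIM (what is proved, stated in full; the proofs are below) =====
def Claim_equal_select_candidate_by_priority : Prop := ∀ (candidate_order : List Int) (safe_candidates : List Int) (option_categories : List (Int × List String)) (priority : List String), Dom_select_candidate_by_priority candidate_order safe_candidates option_categories priority → Spec_select_candidate_by_priority candidate_order safe_candidates option_categories priority (select_candidate_by_priority candidate_order safe_candidates option_categories priority)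

-- ===== LEMMAS AND PROOFS =====

-- the fst of B's fold is untouched when the priority list is empty
theorem pv_fold_nil (seen : PySem.Set Int) (oc : List (Int × List String))
    (co : List Int) (b : Option (Nat × Int × String)) (f : Option Int) :
    (co.foldl (pvStepB seen oc []) (b, f)).1 = b := by
  induction co generalizing b f with
  | nil => rfl
  | cons o rest ih =>
    simp only [List.foldl_cons, pvStepB, pvRankHit]
    split <;> simp [ih]

-- a best of rank 0 is never improved
theorem pv_fold_zero (seen : PySem.Set Int) (oc : List (Int × List String))
    (pr : List String) (co : List Int) (x : Int) (y : String) (f : Option Int) :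
    (co.foldl (pvStepB seen oc pr) (some (0, x, y), f)).1 = some (0, x, y) := by
  induction co generalizing f with
  | nil => rfl
  | cons o rest ih =>
    simp only [List.foldl_cons, pvStepB]
    split
    · cases h : pvRankHit ((PySem.Dict.mk oc).getD o []) pr with
      | none => simpa [h] using ih _
      | some ic => simpa [h] using ih _
    · exact ih f

-- invariant used below: the accumulated best, if any, has rank ≥ 1
def pvGe1 (b : Option (Nat × Int × String)) : Prop :=
  b = none ∨ ∃ j x y, b = some (j, x, y) ∧ 1 ≤ j

-- if A's inner scan for category p finds o, then B's fold (for priority p :: ps),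
-- started from a best of rank ≥ 1 (or none), ends with best = (0, o, p)
theorem pv_fold_first (seen : PySem.Set Int) (oc : List (Int × List String))
    (p : String) (ps : List String) (co : List Int) (o : Int)
    (h : pvFindOpt seen oc p co = some o) :
    ∀ b f, pvGe1 b →
      (co.foldl (pvStepB seen oc (p :: ps)) (b, f)).1 = some (0, o, p) := by
  induction co with
  | nil => simp [pvFindOpt] at h
  | cons c rest ih =>
    intro b f hb
    simp only [pvFindOpt] at h
    by_cases hs : seen.contains c = true
    · rw [if_pos hs] at h
      by_cases hc : ((PySem.Dict.mk oc).getD c []).contains p = true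
      · rw [if_pos hc] at h
        injection h with h
        subst h
        simp only [List.foldl_cons, pvStepB, hs, if_true, pvRankHit, hc]
        rcases hb with rfl | ⟨j, x, y, rfl, hj⟩
        · exact pv_fold_zero seen oc (p :: ps) rest c p _
        · have h0 : 0 < j := hj
          simpa [h0] using pv_fold_zero seen oc (p :: ps) rest c p _
      · rw [if_neg hc] at h
        simp only [List.foldl_cons, pvStepB, hs, if_true, pvRankHit, hc,
          Bool.false_eq_true, if_false]
        cases hr : pvRankHit ((PySem.Dict.mk oc).getD c []) ps with
        | none => simpa [hr] using ih h _ _ hb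
        | some ic =>
          simp only [Option.map_some]
          rcases hb with rfl | ⟨j, x, y, rfl, hj⟩
          · simpa using ih h _ _ (Or.inr ⟨ic.1 + 1, c, ic.2, rfl, by omega⟩)
          · by_cases hij : ic.1 + 1 < j
            · simpa [hij] using ih h _ _ (Or.inr ⟨ic.1 + 1, c, ic.2, rfl, by omega⟩)
            · simpa [hij] using ih h _ _ (Or.inr ⟨j, x, y, rfl, hj⟩)
    · rw [if_neg hs] at h
      simp only [List.foldl_cons, pvStepB, hs]
      exact ih h b f hb

-- rank shift of a best triple
def pvShift (b : Option (Nat × Int × String)) : Option (Nat × Int × String) :=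
  b.map (fun t => (t.1 + 1, t.2.1, t.2.2))

-- if no safe candidate carries category p, B's fold for p :: ps is the fold for ps
-- with every rank shifted by one (the fallback component is unchanged)
theorem pv_fold_shift (seen : PySem.Set Int) (oc : List (Int × List String))
    (p : String) (ps : List String) (co : List Int)
    (h : pvFindOpt seen oc p co = none) :
    ∀ b f, co.foldl (pvStepB seen oc (p :: ps)) (pvShift b, f) =
      (pvShift (co.foldl (pvStepB seen oc ps) (b, f)).1,
       (co.foldl (pvStepB seen oc ps) (b, f)).2) := by
  induction co with
  | nil => intro b f; rfl
  | cons c rest ih =>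
    intro b f
    simp only [pvFindOpt] at h
    by_cases hs : seen.contains c = true
    · rw [if_pos hs] at h
      by_cases hc : ((PySem.Dict.mk oc).getD c []).contains p = true
      · rw [if_pos hc] at h; exact absurd h (by simp)
      · rw [if_neg hc] at h
        simp only [List.foldl_cons, pvStepB, hs, if_true, pvRankHit, hc,
          Bool.false_eq_true, if_false]
        cases hr : pvRankHit ((PySem.Dict.mk oc).getD c []) ps with
        | none => simpa [hr] using ih h b _
        | some ic =>
          simp only [Option.map_some]
          cases b with
          | none => simpa [pvShift] using ih h (some (ic.1, c, ic.2)) _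
          | some t =>
            simp only [pvShift, Option.map_some]
            by_cases hij : ic.1 < t.1
            · have hij' : ic.1 + 1 < t.1 + 1 := by omega
              simpa [pvShift, hij, hij'] using ih h (some (ic.1, c, ic.2)) _
            · have hij' : ¬ (ic.1 + 1 < t.1 + 1) := by omega
              simpa [pvShift, hij, hij'] using ih h (some t) _
    · rw [if_neg hs] at h
      simp only [List.foldl_cons, pvStepB, hs]
      exact ih h b f

-- main correspondence: A's nested loop result is the projection of B's fold best
theorem pv_main (seen : PySem.Set Int) (oc : List (Int × List String)) (co : List Int) :
    ∀ ps, pvLoopA co seen oc ps =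
      ((co.foldl (pvStepB seen oc ps) (none, none)).1).map
        (fun t => (t.2.1, some t.2.2)) := by
  intro ps
  induction ps with
  | nil => simp [pvLoopA, pv_fold_nil]
  | cons p ps ih =>
    simp only [pvLoopA]
    cases h : pvFindOpt seen oc p co with
    | some o =>
      rw [pv_fold_first seen oc p ps co o h none none (Or.inl rfl)]
      rfl
    | none =>
      have hsh := pv_fold_shift seen oc p ps co h none none
      simp only [pvShift, Option.map_none] at hsh
      rw [hsh, ih]
      cases (co.foldl (pvStepB seen oc ps) (none, none)).1 <;> rfl

-- the fallback component of B's fold, once set, is stable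
theorem pv_fold_snd_some (seen : PySem.Set Int) (oc : List (Int × List String))
    (pr : List String) (co : List Int) (x : Int) :
    ∀ b, (co.foldl (pvStepB seen oc pr) (b, some x)).2 = some x := by
  induction co with
  | nil => intro b; rfl
  | cons c rest ih =>
    intro b
    simp only [List.foldl_cons, pvStepB]
    split <;> simp [ih]

-- the fallback component of B's fold is the first safe candidate
theorem pv_fold_snd (seen : PySem.Set Int) (oc : List (Int × List String))
    (pr : List String) (co : List Int) :
    ∀ b, (co.foldl (pvStepB seen oc pr) (b, none)).2 =
      co.find? (fun o => seen.contains o) := by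
  induction co with
  | nil => intro b; rfl
  | cons c rest ih =>
    intro b
    by_cases hs : c ∈ seen
    · rw [List.find?_cons_of_pos (by simpa using hs)]
      simp [pvStepB, hs, pv_fold_snd_some]
    · rw [List.find?_cons_of_neg (by simpa using hs)]
      simp [pvStepB, hs, ih]

-- A's fallback loop is find? of the safety test
theorem pv_fallback_eq (seen : PySem.Set Int) (co : List Int) :
    pvFallback seen co =
      (co.find? (fun o => seen.contains o)).map (fun o => (o, none)) := by
  induction co with
  | nil => rfl
  | cons c rest ih =>
    by_cases hs : c ∈ seen
    · rw [List.find?_cons_of_pos (by simpa using hs)]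
      simp [pvFallback, hs]
    · rw [List.find?_cons_of_neg (by simpa using hs)]
      simp [pvFallback, hs, ih]

-- with an empty safe set B's step is the identity
theorem pv_fold_seen_nil (oc : List (Int × List String)) (pr : List String)
    (co : List Int) (b : Option (Nat × Int × String)) (f : Option Int) :
    co.foldl (pvStepB ([] : PySem.Set Int) oc pr) (b, f) = (b, f) := by
  induction co generalizing b f with
  | nil => rfl
  | cons c rest ih => simpa [pvStepB] using ih b f

-- B returns none when there are no safe candidates
theorem pv_alt_empty (co : List Int) (oc : List (Int × List String))
    (priority : List String) :
    select_candidate_by_priority_alt co [] oc priority = none := by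
  unfold select_candidate_by_priority_alt
  simp only [show PySem.Set.ofList ([] : List Int) = [] from rfl, pv_fold_seen_nil]

-- ===== VERDICT (by name: the statement is the Claim_ definition above) =====
theorem select_candidate_by_priority_spec : Claim_equal_select_candidate_by_priority := by
  intro co sc oc priority _
  unfold Spec_select_candidate_by_priority
  by_cases hsc : sc = []
  · subst hsc
    rw [pv_alt_empty]
    unfold select_candidate_by_priority
    simp
  · unfold select_candidate_by_priority select_candidate_by_priority_alt
    simp only [hsc, if_false]
    set pr0 := priority.filter (fun p => (["skill_pts", "hints", "stats", "energy"] : List String).contains p) with hpr0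
    set pr := if pr0 = [] then ["skill_pts", "stats", "hints"] else pr0 with hpr
    set seen := PySem.Set.ofList sc with hseen
    have hmain := pv_main seen oc co pr
    cases hb : (co.foldl (pvStepB seen oc pr) (none, none)).1 with
    | some t =>
      rw [hb] at hmain
      simp only [Option.map_some] at hmain
      simp [hmain]
    | none =>
      rw [hb] at hmain
      simp only [Option.map_none] at hmain
      simp only [hmain, pv_fold_snd, pv_fallback_eq]
      cases co.find? (fun o => seen.contains o) <;> rfl
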